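-- pv_equiv track=rewrite | github.com/dawoodaijaz97/Leetcode | count-islands-with-total-value-divisible-by-k/solution.py | solve
-- ===== SOURCE A (Python) =====
-- from typing import List
--
-- def solve(grid: List[List[int]], k: int) -> int:
--     def dfs(x: int, y: int) -> int:
--         if x < 0 or x >= len(grid) or y < 0 or y >= len(grid[0]) or grid[x][y] == 0:
--             return 0
--         value = grid[x][y]
--         grid[x][y] = 0  # Mark as visited
--         for dx, dy in [(-1, 0), (1, 0), (0, -1), (0, 1)]:
--             value += dfs(x + dx, y + dy)
--         return value
--
--     island_count = 0
--     for i in range(len(grid)):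
--         for j in range(len(grid[0])):
--             if grid[i][j] > 0:
--                 island_value = dfs(i, j)
--                 if island_value % k == 0:
--                     island_count += 1
--
--     return island_count
-- ===== SOURCE B (Python) =====
-- from typing import List
--
-- def solve(grid: List[List[int]], k: int) -> int:
--     # Iterative explicit-stack flood fill (no recursion); zeroes visited cells like the original.
--     island_count = 0
--     for i in range(len(grid)):
--         for j in range(len(grid[0])):
--             if grid[i][j] > 0:
--                 total = 0
--                 stack = [(i, j)]
--                 while stack:
--                     x, y = stack.pop()
--                     if 0 <= x < len(grid) and 0 <= y < len(grid[0]) and grid[x][y] != 0: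
--                         total += grid[x][y]
--                         grid[x][y] = 0
--                         stack.extend(((x, y + 1), (x, y - 1), (x + 1, y), (x - 1, y)))
--                 if total % k == 0:
--                     island_count += 1
--     return island_count
-- ===== Notes on version B (the rewrite author's own statement) =====
-- stated objective: alternative
-- what changed: The nested recursive dfs is replaced by an iterative explicit-stack flood fill: cells are popped from a worklist, their value added to the island total and zeroed, and in-bounds nonzero neighbours pushed; no recursion and no inner function.
import Mathlib
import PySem

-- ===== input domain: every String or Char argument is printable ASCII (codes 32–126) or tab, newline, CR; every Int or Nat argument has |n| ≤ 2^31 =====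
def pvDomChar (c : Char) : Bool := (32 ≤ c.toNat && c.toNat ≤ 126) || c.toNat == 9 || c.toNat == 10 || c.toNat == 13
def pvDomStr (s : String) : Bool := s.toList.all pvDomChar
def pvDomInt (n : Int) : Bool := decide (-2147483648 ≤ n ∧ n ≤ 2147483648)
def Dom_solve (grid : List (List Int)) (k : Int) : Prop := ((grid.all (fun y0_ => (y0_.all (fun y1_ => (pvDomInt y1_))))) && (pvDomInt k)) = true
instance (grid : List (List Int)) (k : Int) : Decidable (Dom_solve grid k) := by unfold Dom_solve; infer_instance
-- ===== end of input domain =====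

-- B replaces A's recursive dfs by an iterative explicit-stack flood fill.  In Python both
-- versions zero the visited cells of `grid` in place (the same final grid); the theorem below
-- is about the return value.

-- number of columns Python reads: len(grid[0])
def pvCols (g : List (List Int)) : Nat := (g.headD []).length

-- grid[x][y] read (only evaluated under the 0 ≤ x, 0 ≤ y bounds guards; default 0)
def getCell : List (List Int) → Nat → Nat → Int
  | [], _, _ => 0
  | r :: _, 0, y => r.getD y 0
  | _ :: rs, x+1, y => getCell rs x y

-- grid[x][y] = 0 write
def zeroCell : List (List Int) → Nat → Nat → List (List Int)
  | [], _, _ => []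
  | r :: rs, 0, y => r.set y 0 :: rs
  | r :: rs, x+1, y => r :: zeroCell rs x y

-- number of nonzero cells: fuel for A's dfs and termination measure for B's while-loop
def nzRow (r : List Int) : Nat := r.countP (fun c => decide (c ≠ 0))
def nz (g : List (List Int)) : Nat := (g.map nzRow).sum

theorem nzRow_set_lt (r : List Int) (y : Nat) (h : r.getD y 0 ≠ 0) :
    nzRow (r.set y 0) < nzRow r := by
  induction r generalizing y with
  | nil => simp at h
  | cons a as ih =>
    cases y with
    | zero =>
      simp only [List.getD_cons_zero] at h
      simp [nzRow, h]
    | succ y =>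
      simp only [List.getD_cons_succ] at h
      have := ih y h
      simp only [List.set_cons_succ, nzRow, List.countP_cons] at *
      omega

theorem nz_zeroCell_lt (g : List (List Int)) (x y : Nat) (h : getCell g x y ≠ 0) :
    nz (zeroCell g x y) < nz g := by
  induction g generalizing x with
  | nil => simp [getCell] at h
  | cons r rs ih =>
    cases x with
    | zero =>
      simp only [getCell] at h
      have := nzRow_set_lt r y h
      simp only [zeroCell, nz, List.map_cons, List.sum_cons]
      omega
    | succ x =>
      simp only [getCell] at h
      have := ih x h
      simp only [zeroCell, nz, List.map_cons, List.sum_cons] at *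
      omega

-- ===== PORT A =====
-- the recursive dfs, made total with a fuel guard (the caller passes nz g + 1, which is
-- always enough: every non-base call zeroes a nonzero cell)
def dfsF : Nat → List (List Int) → Int → Int → Int × List (List Int)
  | 0, g, _, _ => (0, g)
  | fuel+1, g, x, y =>
    if x < 0 ∨ (g.length : Int) ≤ x ∨ y < 0 ∨ (pvCols g : Int) ≤ y ∨ getCell g x.toNat y.toNat = 0 then
      (0, g)
    else
      let v := getCell g x.toNat y.toNat
      let g0 := zeroCell g x.toNat y.toNat
      let r1 := dfsF fuel g0 (x - 1) y
      let r2 := dfsF fuel r1.2 (x + 1) y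
      let r3 := dfsF fuel r2.2 x (y - 1)
      let r4 := dfsF fuel r3.2 x (y + 1)
      (v + r1.1 + r2.1 + r3.1 + r4.1, r4.2)

-- for j in range(len(grid[0])): …
def loopJA (k i : Int) (js : List Int) (g : List (List Int)) (cnt : Int) :
    Int × List (List Int) :=
  match js with
  | [] => (cnt, g)
  | j :: rest =>
    if 0 < getCell g i.toNat j.toNat then
      let r := dfsF (nz g + 1) g i j
      loopJA k i rest r.2 (if PySem.Int.mod r.1 k = 0 then cnt + 1 else cnt)
    else loopJA k i rest g cnt

-- for i in range(len(grid)): …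
def loopIA (k : Int) (is : List Int) (g : List (List Int)) (cnt : Int) :
    Int × List (List Int) :=
  match is with
  | [] => (cnt, g)
  | i :: rest =>
    let r := loopJA k i (PySem.List.pyRange 0 (pvCols g) 1) g cnt
    loopIA k rest r.2 r.1

def solve (grid : List (List Int)) (k : Int) : Int :=
  (loopIA k (PySem.List.pyRange 0 grid.length 1) grid 0).1

-- ===== PORT B =====
-- the while-loop over the explicit stack: head of the list = top of the Python stack
-- (stack.extend((…)) followed by pop() yields the four neighbours in the consed order)
def stackLoop (g : List (List Int)) (st : List (Int × Int)) (total : Int) :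
    Int × List (List Int) :=
  match st with
  | [] => (total, g)
  | (x, y) :: rest =>
    if 0 ≤ x ∧ x < (g.length : Int) ∧ 0 ≤ y ∧ y < (pvCols g : Int) ∧ getCell g x.toNat y.toNat ≠ 0 then
      stackLoop (zeroCell g x.toNat y.toNat)
        ((x - 1, y) :: (x + 1, y) :: (x, y - 1) :: (x, y + 1) :: rest)
        (total + getCell g x.toNat y.toNat)
    else stackLoop g rest total
termination_by (nz g, st.length)
decreasing_by
  · exact Prod.Lex.left _ _ (nz_zeroCell_lt g _ _ (by tauto))
  · exact Prod.Lex.right _ (by simp)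

def solve_alt (grid : List (List Int)) (k : Int) : Int :=
  ((PySem.List.pyRange 0 grid.length 1).foldl (fun (st : Int × List (List Int)) i =>
    (PySem.List.pyRange 0 (pvCols st.2) 1).foldl (fun (st2 : Int × List (List Int)) j =>
      if 0 < getCell st2.2 i.toNat j.toNat then
        ((if PySem.Int.mod (stackLoop st2.2 [(i, j)] 0).1 k = 0 then st2.1 + 1 else st2.1),
          (stackLoop st2.2 [(i, j)] 0).2)
      else st2) st) (0, grid)).1

-- ===== PRECONDITION & SPEC =====
-- Pre_ excludes exactly the inputs where the Python A raises: a row shorter than row 0 makes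
-- the scan grid[i][j] raise IndexError, and k = 0 together with some scanned positive cell
-- reaches island_value % 0 (ZeroDivisionError).
def Pre_solve (grid : List (List Int)) (k : Int) : Prop :=
  (∀ r ∈ grid, (grid.headD []).length ≤ r.length) ∧
  (k ≠ 0 ∨ ∀ r ∈ grid, ∀ c ∈ r.take (grid.headD []).length, c ≤ 0)
instance (grid : List (List Int)) (k : Int) : Decidable (Pre_solve grid k) := by
  unfold Pre_solve; infer_instance

def pvWitness_solve : List (List Int) × Int := ([[1, 2], [3, 0]], 3)

def Spec_solve (grid : List (List Int)) (k : Int) (out : Int) : Prop := out = solve_alt grid k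
instance (grid : List (List Int)) (k : Int) (out : Int) : Decidable (Spec_solve grid k out) := by
  unfold Spec_solve; infer_instance

-- ===== CLAIM (what is proved, stated in full; the proofs are below) =====
def Claim_equal_solve : Prop := ∀ (grid : List (List Int)) (k : Int), Dom_solve grid k → Pre_solve grid k → Spec_solve grid k (solve grid k)

-- ===== LEMMAS AND PROOFS =====

theorem nzRow_set_le (r : List Int) (y : Nat) : nzRow (r.set y 0) ≤ nzRow r := by
  induction r generalizing y with
  | nil => simp
  | cons a as ih =>
    cases y with
    | zero =>
      simp only [List.set_cons_zero, nzRow, List.countP_cons]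
      have h0 : (if decide ((0 : Int) ≠ 0) = true then (1 : Nat) else 0) = 0 := by decide
      omega
    | succ y =>
      have := ih y
      simp only [List.set_cons_succ, nzRow, List.countP_cons] at *
      omega

theorem nz_zeroCell_le (g : List (List Int)) (x y : Nat) : nz (zeroCell g x y) ≤ nz g := by
  induction g generalizing x with
  | nil => simp [zeroCell]
  | cons r rs ih =>
    cases x with
    | zero =>
      have := nzRow_set_le r y
      simp only [zeroCell, nz, List.map_cons, List.sum_cons]
      omega
    | succ x =>
      have := ih x
      simp only [zeroCell, nz, List.map_cons, List.sum_cons] at *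
      omega

-- dfs never increases the number of nonzero cells (any fuel)
theorem dfsF_nz_le (f : Nat) (g : List (List Int)) (x y : Int) :
    nz (dfsF f g x y).2 ≤ nz g := by
  induction f generalizing g x y with
  | zero => simp [dfsF]
  | succ f ih =>
    rw [dfsF]
    split
    · exact Nat.le_refl _
    · have h0 := nz_zeroCell_le g x.toNat y.toNat
      have h1 := ih (zeroCell g x.toNat y.toNat) (x - 1) y
      have h2 := ih (dfsF f (zeroCell g x.toNat y.toNat) (x - 1) y).2 (x + 1) y
      have h3 := ih (dfsF f (dfsF f (zeroCell g x.toNat y.toNat) (x - 1) y).2 (x + 1) y).2 x (y - 1)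
      have h4 := ih (dfsF f (dfsF f (dfsF f (zeroCell g x.toNat y.toNat) (x - 1) y).2 (x + 1) y).2 x (y - 1)).2 x (y + 1)
      simp only
      omega

-- any fuel larger than the number of nonzero cells computes the same result
theorem dfsF_congr (f1 : Nat) : ∀ (f2 : Nat) (g : List (List Int)) (x y : Int),
    nz g < f1 → nz g < f2 → dfsF f1 g x y = dfsF f2 g x y := by
  induction f1 with
  | zero => intro f2 g x y h1; omega
  | succ f1 ih =>
    intro f2 g x y h1 h2
    cases f2 with
    | zero => omega
    | succ f2 =>
      rw [dfsF, dfsF]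
      split
      · rfl
      · rename_i hguard
        have hcell : getCell g x.toNat y.toNat ≠ 0 := by tauto
        have hg0 := nz_zeroCell_lt g x.toNat y.toNat hcell
        set g0 := zeroCell g x.toNat y.toNat with hg0def
        have e1 : dfsF f1 g0 (x - 1) y = dfsF f2 g0 (x - 1) y := ih f2 g0 (x - 1) y (by omega) (by omega)
        have n1 := dfsF_nz_le f1 g0 (x - 1) y
        have e2 : dfsF f1 (dfsF f1 g0 (x - 1) y).2 (x + 1) y = dfsF f2 (dfsF f1 g0 (x - 1) y).2 (x + 1) y :=
          ih f2 _ (x + 1) y (by omega) (by omega)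
        have n2 := dfsF_nz_le f1 (dfsF f1 g0 (x - 1) y).2 (x + 1) y
        have e3 : dfsF f1 (dfsF f1 (dfsF f1 g0 (x - 1) y).2 (x + 1) y).2 x (y - 1)
            = dfsF f2 (dfsF f1 (dfsF f1 g0 (x - 1) y).2 (x + 1) y).2 x (y - 1) :=
          ih f2 _ x (y - 1) (by omega) (by omega)
        have n3 := dfsF_nz_le f1 (dfsF f1 (dfsF f1 g0 (x - 1) y).2 (x + 1) y).2 x (y - 1)
        have e4 : dfsF f1 (dfsF f1 (dfsF f1 (dfsF f1 g0 (x - 1) y).2 (x + 1) y).2 x (y - 1)).2 x (y + 1)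
            = dfsF f2 (dfsF f1 (dfsF f1 (dfsF f1 g0 (x - 1) y).2 (x + 1) y).2 x (y - 1)).2 x (y + 1) :=
          ih f2 _ x (y + 1) (by omega) (by omega)
        simp only [← e1, ← e2, ← e3, ← e4]

-- A's dfs (with its fresh adequate fuel) folded over a list of start cells, threading the grid
def dfsList (g : List (List Int)) (L : List (Int × Int)) : Int × List (List Int) :=
  match L with
  | [] => (0, g)
  | (x, y) :: rest =>
    let r := dfsF (nz g + 1) g x y
    let r2 := dfsList r.2 rest
    (r.1 + r2.1, r2.2)

-- the same fold with one fixed fuel F, as it appears inside dfsF's recursive step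
def dfsChain (F : Nat) (g : List (List Int)) (L : List (Int × Int)) : Int × List (List Int) :=
  match L with
  | [] => (0, g)
  | (x, y) :: rest =>
    let r := dfsF F g x y
    let r2 := dfsChain F r.2 rest
    (r.1 + r2.1, r2.2)

theorem dfsChain_eq_dfsList (L : List (Int × Int)) (F : Nat) (g : List (List Int))
    (h : nz g < F) : dfsChain F g L = dfsList g L := by
  induction L generalizing g with
  | nil => rfl
  | cons p rest ih =>
    obtain ⟨x, y⟩ := p
    have e := dfsF_congr F (nz g + 1) g x y h (by omega)
    have hle := dfsF_nz_le (nz g + 1) g x y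
    simp only [dfsChain, dfsList, e, ih (dfsF (nz g + 1) g x y).2 (by omega)]

theorem dfsList_append (g : List (List Int)) (L1 L2 : List (Int × Int)) :
    dfsList g (L1 ++ L2) =
      ((dfsList g L1).1 + (dfsList (dfsList g L1).2 L2).1, (dfsList (dfsList g L1).2 L2).2) := by
  induction L1 generalizing g with
  | nil => simp [dfsList]
  | cons p rest ih =>
    obtain ⟨x, y⟩ := p
    simp only [List.cons_append, dfsList, ih]
    exact Prod.ext (by ring) rfl

theorem getD_eq_zero_of_nzRow_eq_zero (r : List Int) (y : Nat) (h : nzRow r = 0) :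
    r.getD y 0 = 0 := by
  induction r generalizing y with
  | nil => simp
  | cons a as ih =>
    simp only [nzRow, List.countP_cons] at h
    cases y with
    | zero =>
      simp only [List.getD_cons_zero]
      by_contra hne
      simp [hne] at h
    | succ y =>
      exact ih y (by simp only [nzRow]; omega)

theorem getCell_eq_zero_of_nz_eq_zero (g : List (List Int)) (x y : Nat) (h : nz g = 0) :
    getCell g x y = 0 := by
  induction g generalizing x with
  | nil => simp [getCell]
  | cons r rs ih =>
    simp only [nz, List.map_cons, List.sum_cons] at h
    cases x with
    | zero =>
      exact getD_eq_zero_of_nzRow_eq_zero r y (by omega)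
    | succ x =>
      exact ih x (by simp only [nz]; omega)

-- the key simulation: B's stack loop computes A's dfs folded over the pending cells
theorem stack_eq_dfsList (n : Nat) : ∀ (g : List (List Int)), nz g ≤ n →
    ∀ (L : List (Int × Int)) (t : Int),
    stackLoop g L t = (t + (dfsList g L).1, (dfsList g L).2) := by
  induction n with
  | zero =>
    intro g hg L
    induction L with
    | nil => intro t; simp [stackLoop, dfsList]
    | cons p rest ihL =>
      obtain ⟨x, y⟩ := p
      intro t
      have hcell : getCell g x.toNat y.toNat = 0 :=
        getCell_eq_zero_of_nz_eq_zero g _ _ (by omega)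
      rw [stackLoop, if_neg (by simp [hcell]), ihL]
      have : dfsF (nz g + 1) g x y = (0, g) := by
        rw [dfsF, if_pos (by tauto)]
      simp [dfsList, this]
  | succ n ihn =>
    intro g hg L
    induction L with
    | nil => intro t; simp [stackLoop, dfsList]
    | cons p rest ihL =>
      obtain ⟨x, y⟩ := p
      intro t
      by_cases hc : 0 ≤ x ∧ x < (g.length : Int) ∧ 0 ≤ y ∧ y < (pvCols g : Int) ∧
          getCell g x.toNat y.toNat ≠ 0
      · -- the popped cell is processed: compare with dfsF's recursive step
        rw [stackLoop, if_pos hc]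
        have hlt : nz (zeroCell g x.toNat y.toNat) < nz g := nz_zeroCell_lt g _ _ hc.2.2.2.2
        rw [ihn (zeroCell g x.toNat y.toNat) (by omega)]
        have hguard : ¬(x < 0 ∨ (g.length : Int) ≤ x ∨ y < 0 ∨ (pvCols g : Int) ≤ y ∨
            getCell g x.toNat y.toNat = 0) := by
          simp only [not_or]
          exact ⟨by omega, by omega, by omega, by omega, hc.2.2.2.2⟩
        have hdfs : dfsF (nz g + 1) g x y =
            (getCell g x.toNat y.toNat +
              (dfsList (zeroCell g x.toNat y.toNat) [(x - 1, y), (x + 1, y), (x, y - 1), (x, y + 1)]).1,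
             (dfsList (zeroCell g x.toNat y.toNat) [(x - 1, y), (x + 1, y), (x, y - 1), (x, y + 1)]).2) := by
          rw [dfsF, if_neg hguard, ← dfsChain_eq_dfsList [(x - 1, y), (x + 1, y), (x, y - 1), (x, y + 1)]
            (nz g) (zeroCell g x.toNat y.toNat) hlt]
          simp only [dfsChain]
          exact Prod.ext (by ring) rfl
        have happ := dfsList_append (zeroCell g x.toNat y.toNat)
          [(x - 1, y), (x + 1, y), (x, y - 1), (x, y + 1)] rest
        simp only [List.cons_append, List.nil_append] at happ
        rw [happ]
        have hlist : dfsList g ((x, y) :: rest) =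
            ((dfsF (nz g + 1) g x y).1 + (dfsList (dfsF (nz g + 1) g x y).2 rest).1,
             (dfsList (dfsF (nz g + 1) g x y).2 rest).2) := rfl
        rw [hlist, hdfs]
        exact Prod.ext (by simp; ring) rfl
      · -- the popped cell is skipped: dfsF returns (0, g) on it
        rw [stackLoop, if_neg hc, ihL]
        have hguard : (x < 0 ∨ (g.length : Int) ≤ x ∨ y < 0 ∨ (pvCols g : Int) ≤ y ∨
            getCell g x.toNat y.toNat = 0) := by
          by_contra hno
          simp only [not_or] at hno
          exact hc ⟨by omega, by omega, by omega, by omega, hno.2.2.2.2⟩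
        have : dfsF (nz g + 1) g x y = (0, g) := by rw [dfsF, if_pos hguard]
        simp [dfsList, this]

theorem island_eq (g : List (List Int)) (i j : Int) :
    stackLoop g [(i, j)] 0 = dfsF (nz g + 1) g i j := by
  rw [stack_eq_dfsList (nz g) g (Nat.le_refl _)]
  simp [dfsList]

theorem inner_eq (k i : Int) (js : List Int) (g : List (List Int)) (cnt : Int) :
    js.foldl (fun (st2 : Int × List (List Int)) j =>
      if 0 < getCell st2.2 i.toNat j.toNat then
        ((if PySem.Int.mod (stackLoop st2.2 [(i, j)] 0).1 k = 0 then st2.1 + 1 else st2.1),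
          (stackLoop st2.2 [(i, j)] 0).2)
      else st2) (cnt, g) = loopJA k i js g cnt := by
  induction js generalizing g cnt with
  | nil => simp [loopJA]
  | cons j rest ih =>
    simp only [List.foldl_cons, loopJA]
    by_cases h : 0 < getCell g i.toNat j.toNat
    · rw [if_pos h, if_pos h, island_eq]
      exact ih _ _
    · rw [if_neg h, if_neg h]
      exact ih _ _

theorem outer_eq (k : Int) (is : List Int) (g : List (List Int)) (cnt : Int) :
    is.foldl (fun (st : Int × List (List Int)) i =>
      (PySem.List.pyRange 0 (pvCols st.2) 1).foldl (fun (st2 : Int × List (List Int)) j =>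
        if 0 < getCell st2.2 i.toNat j.toNat then
          ((if PySem.Int.mod (stackLoop st2.2 [(i, j)] 0).1 k = 0 then st2.1 + 1 else st2.1),
            (stackLoop st2.2 [(i, j)] 0).2)
        else st2) st) (cnt, g) = loopIA k is g cnt := by
  induction is generalizing g cnt with
  | nil => simp [loopIA]
  | cons i rest ih =>
    simp only [List.foldl_cons]
    rw [inner_eq]
    have h2 := ih (loopJA k i (PySem.List.pyRange 0 (pvCols g) 1) g cnt).2
      (loopJA k i (PySem.List.pyRange 0 (pvCols g) 1) g cnt).1
    rw [Prod.mk.eta] at h2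
    rw [h2]
    rfl

theorem solve_eq (grid : List (List Int)) (k : Int) : solve grid k = solve_alt grid k := by
  unfold solve solve_alt
  rw [outer_eq]

-- ===== VERDICT (by name: the statement is the Claim_ definition above) =====
theorem solve_spec : Claim_equal_solve := by
  intro grid k _ _
  unfold Spec_solve
  exact solve_eq grid k
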